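-- pv_equiv track=rewrite | github.com/DasLab/arnie | mea/mea_utils.py | get_list_bp_conflicts_
-- ===== SOURCE A (Python) =====
-- def get_list_bp_conflicts_(bp_list):
--     '''given a bp_list gives the list of conflicts bp-s which indicate PK structure
--     Args:
--         bp_list: of list of base pairs where the base pairs are list of indeces of the bp in increasing order (bp[0]<bp[1])
--     returns:
--         List of conflicting basepairs, where conflicting is pairs of base pairs that are intertwined.
--     '''
--     if len(bp_list) <= 1:
--         return []
--     else:
--         current_bp = bp_list[0]
--         conflicts = []
--         for bp in bp_list[1:]:
--             if (bp[0] < current_bp[1] and current_bp[1] < bp[1]):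
--                 conflicts.append([current_bp,bp])
--         return conflicts + get_list_bp_conflicts_(bp_list[1:])
-- ===== SOURCE B (Python) =====
-- def get_list_bp_conflicts_(bp_list):
--     conflicts = []
--     n = len(bp_list)
--     for i in range(n):
--         current = bp_list[i]
--         for j in range(i + 1, n):
--             bp = bp_list[j]
--             if bp[0] < current[1] and current[1] < bp[1]:
--                 conflicts.append([current, bp])
--     return conflicts
-- ===== Notes on version B (the rewrite author's own statement) =====
-- stated objective: simpler
-- what changed: Replaced the recursive slicing (conflicts + recurse on bp_list[1:]) with a single nested index loop accumulating into one list, preserving the exact output order.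
-- outside the precondition, e.g. on get_list_bp_conflicts_([[0, 5], [7]]): A returns [], B returns []
import Mathlib
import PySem

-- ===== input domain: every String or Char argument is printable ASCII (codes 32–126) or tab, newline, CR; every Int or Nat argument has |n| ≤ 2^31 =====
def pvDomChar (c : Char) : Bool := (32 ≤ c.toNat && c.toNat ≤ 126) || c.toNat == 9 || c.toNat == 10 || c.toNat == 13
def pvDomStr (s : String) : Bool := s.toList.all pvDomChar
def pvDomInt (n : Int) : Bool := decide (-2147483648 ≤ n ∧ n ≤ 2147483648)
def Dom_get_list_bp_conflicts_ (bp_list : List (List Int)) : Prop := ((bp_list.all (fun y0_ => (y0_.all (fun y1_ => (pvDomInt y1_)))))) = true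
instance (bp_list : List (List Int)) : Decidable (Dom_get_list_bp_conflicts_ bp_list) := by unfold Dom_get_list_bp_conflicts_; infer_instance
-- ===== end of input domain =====

-- B replaces A's recursive slicing by one nested index loop with a single accumulator (simpler; same quadratic cost, no recursion, no slice copies).

-- ===== PORT A =====
-- A's recursion: [] for len ≤ 1, else the inner append-loop over bp_list[1:] followed by the recursion on bp_list[1:].
def get_list_bp_conflicts_ (bp_list : List (List Int)) : List (List (List Int)) :=
  match bp_list with
  | [] => []
  | current_bp :: rest =>
    if rest.isEmpty then []   -- len(bp_list) <= 1
    else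
      let conflicts := rest.foldl (fun c bp =>
        if PySem.List.pyGetD bp 0 0 < PySem.List.pyGetD current_bp 1 0 ∧
           PySem.List.pyGetD current_bp 1 0 < PySem.List.pyGetD bp 1 0
        then c ++ [[current_bp, bp]] else c) []
      conflicts ++ get_list_bp_conflicts_ rest

-- ===== PORT B =====
-- outer-loop body: 'current = bp_list[i]; for j in range(i+1, n): ...'
def pvStep (bp_list : List (List Int)) (conflicts : List (List (List Int))) (i : Int) : List (List (List Int)) :=
  let current := PySem.List.pyGetD bp_list i []
  (PySem.List.pyRange (i + 1) bp_list.length 1).foldl (fun conflicts j =>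
    let bp := PySem.List.pyGetD bp_list j []
    if PySem.List.pyGetD bp 0 0 < PySem.List.pyGetD current 1 0 ∧
       PySem.List.pyGetD current 1 0 < PySem.List.pyGetD bp 1 0
    then conflicts ++ [[current, bp]] else conflicts) conflicts

def get_list_bp_conflicts__alt (bp_list : List (List Int)) : List (List (List Int)) :=
  (PySem.List.pyRange 0 bp_list.length 1).foldl (pvStep bp_list) []
-- ===== PRECONDITION & SPEC =====
-- Pre_ excludes inputs with an inner pair of length < 2 (on most of those A raises IndexError on bp[0]/bp[1]/current_bp[1];
-- on a few, e.g. [[0,5],[7]], short-circuit 'and' lets A return — B happens to agree there, but they lie outside the claim).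
def Pre_get_list_bp_conflicts_ (bp_list : List (List Int)) : Prop :=
  bp_list.length ≤ 1 ∨ ∀ bp ∈ bp_list, 2 ≤ bp.length
instance (bp_list : List (List Int)) : Decidable (Pre_get_list_bp_conflicts_ bp_list) := by unfold Pre_get_list_bp_conflicts_; infer_instance
def pvWitness_get_list_bp_conflicts_ : List (List Int) := [[0, 5], [2, 7], [6, 9]]
def Spec_get_list_bp_conflicts_ (bp_list : List (List Int)) (out : List (List (List Int))) : Prop := out = get_list_bp_conflicts__alt bp_list
instance (bp_list : List (List Int)) (out : List (List (List Int))) : Decidable (Spec_get_list_bp_conflicts_ bp_list out) := by unfold Spec_get_list_bp_conflicts_; infer_instance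

-- ===== CLAIM (what is proved, stated in full; the proofs are below) =====
def Claim_equal_get_list_bp_conflicts_ : Prop := ∀ (bp_list : List (List Int)), Dom_get_list_bp_conflicts_ bp_list → Pre_get_list_bp_conflicts_ bp_list → Spec_get_list_bp_conflicts_ bp_list (get_list_bp_conflicts_ bp_list)

-- ===== LEMMAS AND PROOFS =====

-- the intertwining test, shared shape of both ports' conditions
def pvPred (cur bp : List Int) : Bool :=
  decide (PySem.List.pyGetD bp 0 0 < PySem.List.pyGetD cur 1 0 ∧
    PySem.List.pyGetD cur 1 0 < PySem.List.pyGetD bp 1 0)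

-- common functional characterisation: suffix-by-suffix conflicts
def pvConf : List (List Int) → List (List (List Int))
  | [] => []
  | cur :: rest =>
    (rest.filter (fun bp => pvPred cur bp)).map (fun bp => [cur, bp]) ++ pvConf rest

lemma portA_eq_pvConf (l : List (List Int)) : get_list_bp_conflicts_ l = pvConf l := by
  induction l with
  | nil => rfl
  | cons cur rest ih =>
    cases rest with
    | nil => rfl
    | cons b t =>
      rw [get_list_bp_conflicts_]
      rw [PySem.List.foldl_append_ite
        (p := fun bp => PySem.List.pyGetD bp 0 0 < PySem.List.pyGetD cur 1 0 ∧
          PySem.List.pyGetD cur 1 0 < PySem.List.pyGetD bp 1 0)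
        (f := fun bp => [cur, bp])]
      simp only [List.isEmpty_cons, Bool.false_eq_true, if_false, ih, pvConf, pvPred,
        List.nil_append]

lemma pvStep_eq (l : List (List Int)) (acc : List (List (List Int))) (a : Nat) (hlt : a < l.length) :
    pvStep l acc (a : Int)
    = acc ++ ((l.drop (a + 1)).filter (fun bp => pvPred l[a] bp)).map (fun bp => [l[a], bp]) := by
  have hget : PySem.List.pyGetD l (a : Int) [] = l[a] := by
    rw [PySem.List.pyGetD_natCast]; simp [List.getD, hlt]
  have hstep : ((a : Int) + 1) = ((a + 1 : Nat) : Int) := by push_cast; ring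
  unfold pvStep
  simp only [hstep]
  rw [PySem.List.foldl_pyRange_pyGetD' (xs := l) (a := ((a + 1 : Nat) : Int)) (d := ([] : List Int))
    (f := fun conflicts bp =>
      if PySem.List.pyGetD bp 0 0 < PySem.List.pyGetD (PySem.List.pyGetD l (a : Int) []) 1 0 ∧
         PySem.List.pyGetD (PySem.List.pyGetD l (a : Int) []) 1 0 < PySem.List.pyGetD bp 1 0
      then conflicts ++ [[PySem.List.pyGetD l (a : Int) [], bp]] else conflicts)
    (init := acc) (by exact_mod_cast Nat.zero_le _)]
  rw [PySem.List.foldl_append_ite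
    (p := fun bp => PySem.List.pyGetD bp 0 0 < PySem.List.pyGetD (PySem.List.pyGetD l (a : Int) []) 1 0 ∧
      PySem.List.pyGetD (PySem.List.pyGetD l (a : Int) []) 1 0 < PySem.List.pyGetD bp 1 0)
    (f := fun bp => [PySem.List.pyGetD l (a : Int) [], bp])]
  simp [hget, pvPred]

lemma portB_suffix (l : List (List Int)) (a : Nat) (acc : List (List (List Int))) :
    (PySem.List.pyRange (a : Int) (l.length : Int) 1).foldl (pvStep l) acc
    = acc ++ pvConf (l.drop a) := by
  rcases lt_or_ge a l.length with hlt | hge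
  · have hcast : ((a : Int)) < (l.length : Int) := by exact_mod_cast hlt
    have hstep : ((a : Int) + 1) = ((a + 1 : Nat) : Int) := by push_cast; ring
    rw [PySem.List.pyRange_one_cons hcast, List.foldl_cons, hstep, portB_suffix l (a + 1),
        pvStep_eq l acc a hlt, List.drop_eq_getElem_cons hlt]
    simp [pvConf]
  · have hcast : (l.length : Int) ≤ (a : Int) := by exact_mod_cast hge
    rw [PySem.List.pyRange_one_eq_nil hcast, List.drop_eq_nil_of_le hge]
    simp [pvConf]
termination_by l.length - a

lemma portB_eq_pvConf (l : List (List Int)) : get_list_bp_conflicts__alt l = pvConf l := by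
  have h := portB_suffix l 0 []
  simpa [get_list_bp_conflicts__alt] using h

-- ===== VERDICT (by name: the statement is the Claim_ definition above) =====
theorem get_list_bp_conflicts__spec : Claim_equal_get_list_bp_conflicts_ := by
  intro l _ _
  unfold Spec_get_list_bp_conflicts_
  rw [portA_eq_pvConf, portB_eq_pvConf]
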